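-- pv_equiv track=rewrite | github.com/daniel-reich/ubiquitous-fiesta | 82AvsFFQprj43XCDS_3.py | no_strangers
-- ===== SOURCE A (Python) =====
-- def no_strangers(txt):
--   txt_nopunc = ''
--   str_punc = '!()-[]{};:"\,<>./?@#$%^&*_~'
--   for i in txt:
--     if i not in str_punc:
--       txt_nopunc += i
--   list1 = txt_nopunc.lower().split()
--   list2a, list2b = [], []
--   dict1 = {}
--   for item in list1:
--     if item not in dict1.keys():
--       dict1[item] = 1
--     else:
--       dict1[item] += 1
--     if dict1[item] >= 3 and dict1[item] < 5 and item not in list2a: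
--       list2a.append(item)
--     elif dict1[item] >=5 and item not in list2b:
--       list2b.append(item)
--       list2a.remove(item)
--   return [list2a, list2b]
-- ===== SOURCE B (Python) =====
-- def no_strangers(txt):
--     str_punc = '!()-[]{};:"\,<>./?@#$%^&*_~'
--     words = ''.join(ch for ch in txt if ch not in str_punc).lower().split()
--     total = {}
--     for w in words:
--         total[w] = total.get(w, 0) + 1
--     seen = {}
--     list2a, list2b = [], []
--     for w in words:
--         seen[w] = seen.get(w, 0) + 1
--         if seen[w] == 3 and total[w] < 5:
--             list2a.append(w)
--         elif seen[w] == 5: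
--             list2b.append(w)
--     return [list2a, list2b]
-- ===== Notes on version B (the rewrite author's own statement) =====
-- stated objective: alternative
-- what changed: Replaces A's single pass that maintains output lists with membership guards and a list2a.remove() repair by a two-pass count-table decomposition: first build the full word-count dict, then walk the words once appending to list2a exactly at a word's 3rd occurrence when its total is 3-4 and to list2b at its 5th occurrence, so no membership tests or removals are needed.
import Mathlib
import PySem

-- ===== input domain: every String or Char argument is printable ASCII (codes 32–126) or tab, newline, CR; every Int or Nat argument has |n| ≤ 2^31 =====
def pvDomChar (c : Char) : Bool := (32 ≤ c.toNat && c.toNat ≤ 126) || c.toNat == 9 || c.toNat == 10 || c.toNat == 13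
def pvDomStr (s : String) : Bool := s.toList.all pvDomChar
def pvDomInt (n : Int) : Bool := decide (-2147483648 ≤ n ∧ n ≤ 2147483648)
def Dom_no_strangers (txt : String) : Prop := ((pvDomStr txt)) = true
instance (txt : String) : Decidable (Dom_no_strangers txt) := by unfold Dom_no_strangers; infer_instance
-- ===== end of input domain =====

-- B replaces A's guarded single pass (membership tests + list2a.remove) by a count-table-then-classify
-- two-pass decomposition; equivalence of the return values is proved for every input (both are total).

-- ===== PORT A =====
-- the punctuation string of A (Python's '\,' is backslash + comma)
def pvPuncA : List Char := "!()-[]{};:\"\\,<>./?@#$%^&*_~".toList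

-- one iteration of A's main loop; list2a.remove(item) is ported with remove?;
-- getD ... list2a is never taken on the branch Python reaches (item is always present there)
def pvStepA (st : PySem.Dict String Int × List String × List String) (item : String) :
    PySem.Dict String Int × List String × List String :=
  let dict1 := st.1
  let list2a := st.2.1
  let list2b := st.2.2
  let dict1 := if ¬ (item ∈ dict1.keys) then dict1.insert item 1
               else dict1.modify item 0 (· + 1)
  if 3 ≤ dict1.getD item 0 ∧ dict1.getD item 0 < 5 ∧ ¬ (item ∈ list2a) then
    (dict1, list2a ++ [item], list2b)
  else if 5 ≤ dict1.getD item 0 ∧ ¬ (item ∈ list2b) then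
    (dict1, (PySem.List.remove? list2a item).getD list2a, list2b ++ [item])
  else
    (dict1, list2a, list2b)

def no_strangers (txt : String) : List (List String) :=
  let txt_nopunc : List Char :=
    txt.toList.foldl (fun acc i => if ¬ (i ∈ pvPuncA) then acc ++ [i] else acc) []
  let list1 := PySem.Str.split₀ (PySem.Str.lower (String.ofList txt_nopunc))
  let fin := list1.foldl pvStepA (PySem.Dict.empty, [], [])
  [fin.2.1, fin.2.2]

-- ===== PORT B =====
def pvPuncB : List Char := "!()-[]{};:\"\\,<>./?@#$%^&*_~".toList

-- one iteration of B's second pass; total[w] is ported with getD (w is always a key of total there)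
def pvStepB (total : PySem.Dict String Int)
    (st : PySem.Dict String Int × List String × List String) (w : String) :
    PySem.Dict String Int × List String × List String :=
  let seen := st.1.insert w (st.1.getD w 0 + 1)
  if seen.getD w 0 = 3 ∧ total.getD w 0 < 5 then (seen, st.2.1 ++ [w], st.2.2)
  else if seen.getD w 0 = 5 then (seen, st.2.1, st.2.2 ++ [w])
  else (seen, st.2.1, st.2.2)

def no_strangers_alt (txt : String) : List (List String) :=
  let words := PySem.Str.split₀ (PySem.Str.lower
    (String.ofList (txt.toList.filter (fun ch => ¬ (ch ∈ pvPuncB)))))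
  let total := words.foldl (fun d w => d.insert w (d.getD w 0 + 1)) PySem.Dict.empty
  let fin := words.foldl (pvStepB total) (PySem.Dict.empty, [], [])
  [fin.2.1, fin.2.2]

-- ===== PRECONDITION & SPEC =====
def Spec_no_strangers (txt : String) (out : List (List String)) : Prop := out = no_strangers_alt txt
instance (txt : String) (out : List (List String)) : Decidable (Spec_no_strangers txt out) := by unfold Spec_no_strangers; infer_instance

-- ===== CLAIM (what is proved, stated in full; the proofs are below) =====
def Claim_equal_no_strangers : Prop := ∀ (txt : String), Dom_no_strangers txt → Spec_no_strangers txt (no_strangers txt)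

-- ===== LEMMAS AND PROOFS =====

-- A's accumulating punctuation loop builds the same character list as B's filter
lemma pv_nopunc_eq (l : List Char) :
    l.foldl (fun acc i => if ¬ (i ∈ pvPuncA) then acc ++ [i] else acc) [] =
      l.filter (fun ch => ¬ (ch ∈ pvPuncB)) := by
  have h := PySem.List.foldl_append_if (fun ch => !decide (ch ∈ pvPuncA)) (id : Char → Char) l []
  have hP : pvPuncB = pvPuncA := rfl
  rw [hP]
  simpa using h

-- B's total dict counts the whole word list (generalised over the starting dict)
lemma pv_counter_getD (l : List String) (d : PySem.Dict String Int) (v : String) :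
    (l.foldl (fun d w => d.insert w (d.getD w 0 + 1)) d).getD v 0 = d.getD v 0 + l.count v := by
  induction l generalizing d with
  | nil => simp
  | cons x xs ih =>
    simp only [List.foldl_cons, ih, List.count_cons]
    rw [PySem.Dict.getD_insert]
    by_cases h : v = x
    · subst h; simp; ring
    · have h2 : ¬ x = v := fun hh => h hh.symm
      simp [h, h2]

lemma pv_total_getD (l : List String) (w : String) :
    (l.foldl (fun d w => d.insert w (d.getD w 0 + 1)) PySem.Dict.empty).getD w 0 =
      (l.count w : Int) := by
  rw [pv_counter_getD]; simp

-- erasing an element the filter drops anyway does not change the filter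
lemma pv_filter_erase (l : List String) (a : String) (p : String → Bool) (h : p a = false) :
    (l.erase a).filter p = l.filter p := by
  induction l with
  | nil => rfl
  | cons x xs ih =>
    by_cases hx : x = a
    · subst hx; simp [h]
    · rw [List.erase_cons_tail (by simpa using hx)]
      rw [List.filter_cons, List.filter_cons, ih]

-- the main loop invariant: A's fold and B's fold produce the same output lists
lemma pv_loop_inv (total : PySem.Dict String Int) (full : List String)
    (htotal : ∀ w, total.getD w 0 = (full.count w : Int))
    (r p : List String) (hfull : full = p ++ r)
    (dA sB : PySem.Dict String Int) (aA b aB : List String)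
    (hd1 : ∀ w, dA.getD w 0 = (p.count w : Int))
    (hd2 : ∀ w, dA.contains w = decide (p.count w ≠ 0))
    (hs : ∀ w, sB.getD w 0 = (p.count w : Int))
    (ha : ∀ w, w ∈ aA ↔ 3 ≤ p.count w ∧ p.count w < 5)
    (hnd : aA.Nodup)
    (hb : ∀ w, w ∈ b ↔ 5 ≤ p.count w)
    (haB : aB = aA.filter (fun w => decide (full.count w < 5))) :
    (r.foldl pvStepA (dA, aA, b)).2 = (r.foldl (pvStepB total) (sB, aB, b)).2 := by
  induction r generalizing p dA sB aA b aB with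
  | nil =>
    subst haB
    simp only [List.foldl_nil]
    have hself : aA.filter (fun w => decide (full.count w < 5)) = aA := by
      apply List.filter_eq_self.mpr
      intro w hw
      have h1 := (ha w).mp hw
      have h2 : full.count w = p.count w := by rw [hfull]; simp
      simp only [h2]
      simpa using h1.2
    rw [hself]
  | cons w r' ih =>
    have hfull' : full = (p ++ [w]) ++ r' := by simpa using hfull
    have hcnt : ∀ w', (p ++ [w]).count w' = p.count w' + if w' = w then 1 else 0 := by
      intro w'
      by_cases h : w' = w <;> simp [List.count_append, List.count_eq_zero, h]
    -- A's updated dictionary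
    set D : PySem.Dict String Int :=
      if ¬ (w ∈ dA.keys) then dA.insert w 1 else dA.modify w 0 (· + 1) with hD
    have hmem : w ∈ dA.keys ↔ p.count w ≠ 0 := by
      rw [← PySem.Dict.contains_iff_mem_keys, hd2 w]
      simp
    have hd1' : ∀ w', D.getD w' 0 = ((p ++ [w]).count w' : Int) := by
      intro w'
      rw [hD]
      by_cases h0 : p.count w = 0
      · rw [if_pos (by simp [hmem, h0])]
        rw [PySem.Dict.getD_insert]
        by_cases hww : w' = w
        · subst hww; simp [hcnt, h0]
        · simp [hww, hd1, hcnt]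
      · rw [if_neg (by simp [hmem, h0])]
        rw [PySem.Dict.getD_modify]
        by_cases hww : w' = w
        · subst hww; simp [hcnt, hd1]
        · simp [hww, hd1, hcnt]
    have hd2' : ∀ w', D.contains w' = decide ((p ++ [w]).count w' ≠ 0) := by
      intro w'
      rw [hD]
      by_cases h0 : p.count w = 0 <;>
        [rw [if_pos (by simp [hmem, h0])]; rw [if_neg (by simp [hmem, h0])]] <;>
        [rw [PySem.Dict.contains_insert]; rw [PySem.Dict.contains_modify]] <;>
        · by_cases hww : w' = w
          · subst hww; simp [hcnt]
          · simp [hww, hd2, hcnt]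
    have hgw : D.getD w 0 = (p.count w : Int) + 1 := by
      rw [hd1' w, hcnt w]; simp
    -- B's updated dictionary
    set S : PySem.Dict String Int := sB.insert w (sB.getD w 0 + 1) with hS
    have hs' : ∀ w', S.getD w' 0 = ((p ++ [w]).count w' : Int) := by
      intro w'
      rw [hS, PySem.Dict.getD_insert]
      by_cases hww : w' = w
      · subst hww; simp [hcnt, hs]
      · simp [hww, hs, hcnt]
    have hsw : S.getD w 0 = (p.count w : Int) + 1 := by
      rw [hs' w, hcnt w]; simp
    have hgfull : (full.count w : Int) = total.getD w 0 := (htotal w).symm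
    have hfc : full.count w = (p ++ [w]).count w + r'.count w := by
      rw [hfull', List.count_append]
    simp only [List.foldl_cons]
    -- case analysis on the running count of w
    by_cases h2 : p.count w = 2
    · -- third occurrence: A appends to list2a; B appends iff the total count is below 5
      have hwa : ¬ w ∈ aA := by rw [ha w]; omega
      have hA : pvStepA (dA, aA, b) w = (D, aA ++ [w], b) := by
        simp only [pvStepA, ← hD]
        rw [if_pos ⟨by rw [hgw, h2]; norm_num, by rw [hgw, h2]; norm_num, hwa⟩]
      by_cases hT : full.count w < 5
      · have hB : pvStepB total (sB, aB, b) w = (S, aB ++ [w], b) := by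
          simp only [pvStepB, ← hS]
          rw [if_pos ⟨by rw [hsw, h2]; norm_num, by rw [← hgfull]; exact_mod_cast hT⟩]
        rw [hA, hB]
        refine ih (p ++ [w]) hfull' D S (aA ++ [w]) b (aB ++ [w]) hd1' hd2' hs' ?_ ?_ ?_ ?_
        · intro w'
          by_cases hww : w' = w
          · subst hww; simp [hcnt, h2]
          · simp [hww, ha, hcnt]
        · simp [List.nodup_append, hnd]
          exact fun a hx hxw => hwa (hxw ▸ hx)
        · intro w'
          by_cases hww : w' = w
          · subst hww; simp [hcnt, h2, hb]
          · simp [hww, hb, hcnt]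
        · rw [haB, List.filter_append]
          simp [hT]
      · have hB : pvStepB total (sB, aB, b) w = (S, aB, b) := by
          simp only [pvStepB, ← hS]
          rw [if_neg (by rintro ⟨-, hlt⟩; rw [← hgfull] at hlt; omega),
              if_neg (by rw [hsw, h2]; norm_num)]
        rw [hA, hB]
        refine ih (p ++ [w]) hfull' D S (aA ++ [w]) b aB hd1' hd2' hs' ?_ ?_ ?_ ?_
        · intro w'
          by_cases hww : w' = w
          · subst hww; simp [hcnt, h2]
          · simp [hww, ha, hcnt]
        · simp [List.nodup_append, hnd]
          exact fun a hx hxw => hwa (hxw ▸ hx)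
        · intro w'
          by_cases hww : w' = w
          · subst hww; simp [hcnt, h2, hb]
          · simp [hww, hb, hcnt]
        · rw [haB, List.filter_append]
          simp [hT]
    · by_cases h4 : p.count w = 4
      · -- fifth occurrence: A moves w from list2a to list2b; B appends to list2b
        have hwa : w ∈ aA := by rw [ha w]; omega
        have hwb : ¬ w ∈ b := by rw [hb w]; omega
        have hA : pvStepA (dA, aA, b) w = (D, aA.erase w, b ++ [w]) := by
          simp only [pvStepA, ← hD]
          rw [if_neg (by rintro ⟨-, hlt, -⟩; rw [hgw, h4] at hlt; norm_num at hlt),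
              if_pos ⟨by rw [hgw, h4]; norm_num, hwb⟩,
              PySem.List.remove?_eq_some_erase aA w hwa]
          rfl
        have hB : pvStepB total (sB, aB, b) w = (S, aB, b ++ [w]) := by
          simp only [pvStepB, ← hS]
          rw [if_neg (by rintro ⟨h3, -⟩; rw [hsw, h4] at h3; norm_num at h3),
              if_pos (by rw [hsw, h4]; norm_num)]
        rw [hA, hB]
        have hge5 : ¬ full.count w < 5 := by
          rw [hfc, hcnt w]; simp [h4]
        refine ih (p ++ [w]) hfull' D S (aA.erase w) (b ++ [w]) aB hd1' hd2' hs' ?_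
          (hnd.erase w) ?_ ?_
        · intro w'
          by_cases hww : w' = w
          · subst hww
            simp [hcnt, h4, List.Nodup.not_mem_erase hnd]
          · rw [List.mem_erase_of_ne hww, ha w', hcnt w']
            simp [hww]
        · intro w'
          by_cases hww : w' = w
          · subst hww; simp [hcnt, h4]
          · simp [hww, hb, hcnt]
        · rw [haB, pv_filter_erase _ _ _ (by simpa using hge5)]
      · -- every other occurrence: both loops leave the output lists unchanged
        have hA : pvStepA (dA, aA, b) w = (D, aA, b) := by
          simp only [pvStepA, ← hD]
          by_cases h5 : 5 ≤ p.count w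
          · have hwb : w ∈ b := by rw [hb w]; omega
            rw [if_neg (by rintro ⟨-, hlt, -⟩; rw [hgw] at hlt; omega),
                if_neg (by rintro ⟨-, hh⟩; exact hh hwb)]
          · have hsmall : p.count w ≤ 1 ∨ p.count w = 3 := by omega
            have hwa : ¬ w ∈ aA ∨ (3 ≤ p.count w ∧ p.count w < 5) := by
              rw [ha w]; omega
            rcases hsmall with hs1 | hs3
            · rw [if_neg (by rintro ⟨hge, -, -⟩; rw [hgw] at hge; omega),
                  if_neg (by rintro ⟨hge, -⟩; rw [hgw] at hge; omega)]
            · have hwa' : w ∈ aA := by rw [ha w]; omega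
              rw [if_neg (by rintro ⟨-, -, hh⟩; exact hh hwa'),
                  if_neg (by rintro ⟨hge, -⟩; rw [hgw, hs3] at hge; norm_num at hge)]
        have hB : pvStepB total (sB, aB, b) w = (S, aB, b) := by
          simp only [pvStepB, ← hS]
          rw [if_neg (by rintro ⟨h3, -⟩; rw [hsw] at h3; omega),
              if_neg (by rw [hsw]; omega)]
        rw [hA, hB]
        refine ih (p ++ [w]) hfull' D S aA b aB hd1' hd2' hs' ?_ hnd ?_ ?_
        · intro w'
          by_cases hww : w' = w
          · subst hww
            rw [ha w', hcnt w']
            simp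
            omega
          · rw [ha w', hcnt w']
            simp [hww]
        · intro w'
          by_cases hww : w' = w
          · subst hww
            rw [hb w', hcnt w']
            simp
            omega
          · rw [hb w', hcnt w']
            simp [hww]
        · exact haB

-- ===== VERDICT (by name: the statement is the Claim_ definition above) =====
theorem no_strangers_spec : Claim_equal_no_strangers := by
  intro txt _
  show no_strangers txt = no_strangers_alt txt
  simp only [no_strangers, no_strangers_alt, pv_nopunc_eq]
  generalize PySem.Str.split₀ (PySem.Str.lower (String.ofList (txt.toList.filter (fun ch => ¬ (ch ∈ pvPuncB))))) = ws
  have h := pv_loop_inv (ws.foldl (fun d w => d.insert w (d.getD w 0 + 1)) PySem.Dict.empty) ws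
      (fun w => pv_total_getD ws w) ws [] rfl
      PySem.Dict.empty PySem.Dict.empty [] [] []
      (by simp) (by simp) (by simp) (by simp) List.nodup_nil (by simp) (by simp)
  exact congrArg (fun q : List String × List String => [q.1, q.2]) h
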